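-- pv_equiv track=rewrite | github.com/hiba-tr/invoice-ocr-pfe | postprocess.py | detect_common_prefixes
-- ===== SOURCE A (Python) =====
-- from typing import Dict, List, Any, Set, Optional, Tuple
--
-- def detect_common_prefixes(table_data: List[List[str]]) -> Set[str]:
--     """
--     Détecte automatiquement les préfixes communs dans la première colonne
--     sans préfixes prédéfinis
--     """
--     if not table_data:
--         return set()
--
--     # Extraire la première colonne
--     first_col = [row[0] for row in table_data if row and row[0] and isinstance(row[0], str)]
--
--     if len(first_col) < 2:
--         return set()
--
--     prefixes = set()
--
--     # Analyser les patterns de répétition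
--     for text in first_col:
--         # Chercher des motifs comme "WORD WORD ... WORD" (au moins 2 mots)
--         words = text.split()
--         if len(words) >= 2:
--             # Le préfixe potentiel est le premier mot ou les premiers mots
--             for prefix_len in range(1, min(3, len(words))):  # Max 2 mots comme préfixe
--                 prefix = " ".join(words[:prefix_len])
--
--                 # Vérifier si ce préfixe apparaît dans plusieurs cellules
--                 count = sum(1 for cell in first_col if cell.startswith(prefix + " "))
--                 if count >= 2:  # Au moins 2 occurrences
--                     prefixes.add(prefix)
--
--     return prefixes
-- ===== SOURCE B (Python) =====
-- from typing import List, Set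
--
-- def detect_common_prefixes(table_data: List[List[str]]) -> Set[str]:
--     first_col = [row[0] for row in table_data if row and row[0] and isinstance(row[0], str)]
--     if len(first_col) < 2:
--         return set()
--
--     # Pass 1: counts[p] = number of cells starting with p + " ".
--     # A cell starts with p + " " exactly when p == cell[:i] for some i with
--     # cell[i] == " ", so one scan per cell counts every such space-cut prefix.
--     counts = {}
--     for cell in first_col:
--         for i, ch in enumerate(cell):
--             if ch == " ":
--                 p = cell[:i]
--                 counts[p] = counts.get(p, 0) + 1
--
--     # Pass 2: flat candidate list (first word for >=2-word cells, plus the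
--     # two-word prefix for >=3-word cells), in cell order.
--     cands = []
--     for cell in first_col:
--         w = cell.split()
--         if len(w) >= 3:
--             cands.extend([w[0], w[0] + " " + w[1]])
--         elif len(w) == 2:
--             cands.append(w[0])
--
--     # Pass 3: keep candidates seen at least twice as a (+" ") prefix.
--     return {p for p in cands if counts.get(p, 0) >= 2}
-- ===== Notes on version B (the rewrite author's own statement) =====
-- stated objective: alternative
-- what changed: A rescans the whole first column to count matches for every candidate prefix of every cell (nested scans); B works in staged passes: one pass builds a dictionary counting each cell's space-cut prefixes (a cell starts with p+' ' exactly when p is the cell cut at a space), a second pass builds the flat one-/two-word candidate list, and the result is the candidates filtered by a dictionary lookup.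
import Mathlib
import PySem

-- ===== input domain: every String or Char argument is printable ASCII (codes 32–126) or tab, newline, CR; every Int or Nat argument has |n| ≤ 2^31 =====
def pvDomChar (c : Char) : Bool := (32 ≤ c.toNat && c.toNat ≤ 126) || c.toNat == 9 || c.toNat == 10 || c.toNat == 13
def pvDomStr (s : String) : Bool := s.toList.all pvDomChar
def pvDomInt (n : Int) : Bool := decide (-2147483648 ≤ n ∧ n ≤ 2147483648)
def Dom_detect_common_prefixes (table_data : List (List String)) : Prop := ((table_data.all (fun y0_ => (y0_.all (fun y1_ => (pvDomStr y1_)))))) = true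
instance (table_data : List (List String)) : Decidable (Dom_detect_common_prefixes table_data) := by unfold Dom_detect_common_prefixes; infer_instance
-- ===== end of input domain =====

-- B replaces A's per-candidate rescan of the whole first column by staged passes: one pass
-- building a prefix-count dictionary, one pass building a flat candidate list, then a filter
-- with dictionary lookups (alternative algorithm; not measurably faster on the generated inputs).

-- ===== PORT A =====
-- first column: [row[0] for row in table_data if row and row[0] and isinstance(row[0], str)]
def pvFirstColA (table_data : List (List String)) : List String :=
  table_data.flatMap (fun row => match row with
    | [] => []
    | s :: _ => if s = "" then [] else [s])

-- count = sum(1 for cell in first_col if cell.startswith(prefix + " "))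
def pvCountA (first_col : List String) (pfx : String) : Nat :=
  first_col.countP (fun cell => PySem.Str.startswith cell (pfx ++ " "))

def detect_common_prefixes (table_data : List (List String)) : List String :=
  if table_data = [] then PySem.Set.empty
  else
    let first_col := pvFirstColA table_data
    if first_col.length < 2 then PySem.Set.empty
    else
      first_col.foldl (fun prefixes text =>
        let words := PySem.Str.split₀ text
        if 2 ≤ words.length then
          (PySem.List.pyRange 1 (min 3 (words.length : Int)) 1).foldl
            (fun prefixes k =>
              let pfx := PySem.Str.join " " (PySem.List.slice words none (some k))
              if 2 ≤ pvCountA first_col pfx then PySem.Set.add prefixes pfx else prefixes)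
            prefixes
        else prefixes) PySem.Set.empty

-- ===== PORT B =====
-- [row[0] for row in table_data if row and row[0]] as a filterMap
def pvFirstColB (table_data : List (List String)) : List String :=
  table_data.filterMap (fun row => match row with
    | [] => none
    | s :: _ => if s = "" then none else some s)

-- for i, ch in enumerate(cell): if ch == " ": p = cell[:i]; counts[p] = counts.get(p, 0) + 1
def pvCellStepB (counts : PySem.Dict String Int) (cell : String) : PySem.Dict String Int :=
  (PySem.List.enumerate cell.toList 0).foldl
    (fun counts p =>
      if p.2 = ' ' then
        let pfx := PySem.Str.slice cell none (some p.1)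
        counts.insert pfx (counts.getD pfx 0 + 1)
      else counts) counts

def pvCountsB (first_col : List String) : PySem.Dict String Int :=
  first_col.foldl pvCellStepB PySem.Dict.empty

-- w = cell.split(); [w[0], w[0]+" "+w[1]] if len(w)>=3 else [w[0]] if len(w)==2 else []
def pvCandsB (cell : String) : List String :=
  match PySem.Str.split₀ cell with
  | a :: b :: _ :: _ => [a, a ++ " " ++ b]
  | [a, _] => [a]
  | _ => []

def detect_common_prefixes_alt (table_data : List (List String)) : List String :=
  let first_col := pvFirstColB table_data
  if first_col.length < 2 then PySem.Set.empty
  else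
    let counts := pvCountsB first_col
    let cands := first_col.flatMap pvCandsB
    (cands.filter (fun p => decide ((2 : Int) ≤ counts.getD p 0))).foldl
      PySem.Set.add PySem.Set.empty

-- ===== PRECONDITION & SPEC =====
def Spec_detect_common_prefixes (table_data : List (List String)) (out : List String) : Prop := out = detect_common_prefixes_alt table_data
instance (table_data : List (List String)) (out : List String) : Decidable (Spec_detect_common_prefixes table_data out) := by unfold Spec_detect_common_prefixes; infer_instance

-- ===== CLAIM (what is proved, stated in full; the proofs are below) =====
def Claim_equal_detect_common_prefixes : Prop := ∀ (table_data : List (List String)), Dom_detect_common_prefixes table_data → Spec_detect_common_prefixes table_data (detect_common_prefixes table_data)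

-- ===== LEMMAS AND PROOFS =====

-- the two first-column extractions agree
lemma pvFirstCol_eq (t : List (List String)) : pvFirstColB t = pvFirstColA t := by
  induction t with
  | nil => rfl
  | cons r rs ih =>
      unfold pvFirstColB pvFirstColA at *
      cases r with
      | nil => simpa using ih
      | cons s _ =>
          by_cases h : s = "" <;> simp [h, ih]

-- the list of space-cut prefixes of a cell, in B's counting-loop order
def pvSpacePrefixes (cell : String) : List String :=
  (PySem.List.enumerate cell.toList 0).filterMap
    (fun p => if p.2 = ' ' then some (PySem.Str.slice cell none (some p.1)) else none)

lemma pvFoldlIfFilterMap {α β δ : Type} (P : α → Prop) [DecidablePred P] (g : α → β)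
    (f : δ → β → δ) : ∀ (l : List α) (d : δ),
    l.foldl (fun d x => if P x then f d (g x) else d) d
      = (l.filterMap (fun x => if P x then some (g x) else none)).foldl f d := by
  intro l
  induction l with
  | nil => intro d; rfl
  | cons x xs ih =>
      intro d
      by_cases h : P x <;> simp [h, ih]

lemma pvPrefixChar (cs q : List Char) :
    (∃ k, ∃ _ : k < cs.length, cs[k] = ' ' ∧ cs.take k = q) ↔ (q ++ [' ']) <+: cs := by
  constructor
  · rintro ⟨k, hk, hsp, htake⟩
    have h1 : q ++ [' '] = cs.take (k + 1) := by
      rw [← htake, ← hsp, List.take_add_one]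
      simp [List.getElem?_eq_getElem hk]
    rw [h1]
    exact List.take_prefix _ _
  · rintro ⟨t, ht⟩
    have hcs : cs = q ++ ' ' :: t := by rw [← ht]; simp
    subst hcs
    refine ⟨q.length, by simp, ?_, by simp⟩
    simp

lemma pvMemSp (cell p : String) :
    p ∈ pvSpacePrefixes cell ↔ PySem.Str.startswith cell (p ++ " ") = true := by
  have hsw : PySem.Str.startswith cell (p ++ " ") = true ↔ (p.toList ++ [' ']) <+: cell.toList := by
    rw [PySem.Str.startswith_eq, PySem.Chars.startswith_iff]
    simp
  rw [hsw, ← pvPrefixChar]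
  unfold pvSpacePrefixes
  simp only [List.mem_filterMap]
  constructor
  · rintro ⟨a, ha, hf⟩
    obtain ⟨k, hk, rfl⟩ := (PySem.List.mem_enumerate_iff _ _ _).1 ha
    by_cases hc : cell.toList[k] = ' '
    · rw [if_pos hc] at hf
      refine ⟨k, hk, hc, ?_⟩
      have h2 := congrArg String.toList (Option.some.inj hf)
      rw [PySem.Str.toList_slice] at h2
      simp only [PySem.Chars.slice_eq_listSlice] at h2
      rw [PySem.List.slice_to _ (by positivity)] at h2
      simpa using h2
    · rw [if_neg hc] at hf
      cases hf
  · rintro ⟨k, hk, hc, htake⟩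
    refine ⟨((0 : Int) + k, cell.toList[k]), (PySem.List.mem_enumerate_iff _ _ _).2 ⟨k, hk, rfl⟩, ?_⟩
    rw [if_pos hc]
    refine congrArg some (String.toList_inj.mp ?_)
    rw [PySem.Str.toList_slice]
    simp only [PySem.Chars.slice_eq_listSlice]
    rw [PySem.List.slice_to _ (by positivity)]
    simpa using htake

lemma pvNodupSp (cell : String) : (pvSpacePrefixes cell).Nodup := by
  unfold pvSpacePrefixes
  apply List.pairwise_filterMap.mpr
  have hp := List.Pairwise.and_mem.mp (PySem.List.pairwise_lt_enumerate cell.toList 0)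
  refine List.Pairwise.imp ?_ hp
  rintro a b ⟨hma, hmb, hlt⟩
  intro x hx y hy
  obtain ⟨ka, hka, rfl⟩ := (PySem.List.mem_enumerate_iff _ _ _).1 hma
  obtain ⟨kb, hkb, rfl⟩ := (PySem.List.mem_enumerate_iff _ _ _).1 hmb
  simp only at hx hy hlt
  by_cases hca : cell.toList[ka] = ' '
  · by_cases hcb : cell.toList[kb] = ' '
    · rw [if_pos hca] at hx
      rw [if_pos hcb] at hy
      have hxl := congrArg String.toList (Option.some.inj hx)
      have hyl := congrArg String.toList (Option.some.inj hy)
      rw [PySem.Str.toList_slice] at hxl hyl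
      simp only [PySem.Chars.slice_eq_listSlice] at hxl hyl
      rw [PySem.List.slice_to _ (by positivity)] at hxl
      rw [PySem.List.slice_to _ (by positivity)] at hyl
      intro he
      have hts : x.toList = y.toList := by rw [he]
      rw [← hxl, ← hyl] at hts
      have hlen := congrArg List.length hts
      rw [List.length_take, List.length_take] at hlen
      have hkk : ka < kb := by simpa using hlt
      omega
    · rw [if_neg hcb] at hy
      cases hy
  · rw [if_neg hca] at hx
    cases hx

lemma pvFoldlFunCongr {α β : Type} {f g : β → α → β} (h : ∀ b a, f b a = g b a)
    (l : List α) (i : β) : l.foldl f i = l.foldl g i := by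
  rw [show f = g from funext fun b => funext fun a => h b a]

lemma pvCountSp (cell p : String) :
    (pvSpacePrefixes cell).count p
      = if PySem.Str.startswith cell (p ++ " ") then 1 else 0 := by
  by_cases h : PySem.Str.startswith cell (p ++ " ") = true
  · rw [if_pos h]
    exact List.count_eq_one_of_mem (pvNodupSp cell) ((pvMemSp cell p).2 h)
  · rw [if_neg h]
    exact List.count_eq_zero_of_not_mem (fun hm => h ((pvMemSp cell p).1 hm))

lemma pvGetDFoldInsert (l : List String) :
    ∀ (d : PySem.Dict String Int) (p : String),
    (l.foldl (fun d x => d.insert x (d.getD x 0 + 1)) d).getD p 0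
      = d.getD p 0 + (l.count p : Int) := by
  induction l with
  | nil => intro d p; simp
  | cons x xs ih =>
      intro d p
      simp only [List.foldl_cons, ih, List.count_cons]
      by_cases h : p = x
      · subst h
        simp [PySem.Dict.getD_insert_self]
        ring
      · have h' : ¬x = p := fun e => h e.symm
        simp [PySem.Dict.getD_insert_of_ne _ _ _ h, h']

lemma pvCellStepGetD (d : PySem.Dict String Int) (cell p : String) :
    (pvCellStepB d cell).getD p 0
      = d.getD p 0 + (if PySem.Str.startswith cell (p ++ " ") then 1 else 0) := by
  have h1 : pvCellStepB d cell
      = (pvSpacePrefixes cell).foldl (fun d x => d.insert x (d.getD x 0 + 1)) d := by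
    unfold pvCellStepB pvSpacePrefixes
    exact pvFoldlIfFilterMap (fun q : Int × Char => q.2 = ' ')
      (fun q : Int × Char => PySem.Str.slice cell none (some q.1))
      (fun d x => d.insert x (d.getD x 0 + 1)) (PySem.List.enumerate cell.toList 0) d
  rw [h1, pvGetDFoldInsert, pvCountSp]
  split <;> simp

lemma pvCountsGetD (l : List String) :
    ∀ (d : PySem.Dict String Int) (p : String),
    (l.foldl pvCellStepB d).getD p 0
      = d.getD p 0 + ((l.countP (fun cell => PySem.Str.startswith cell (p ++ " "))) : Int) := by
  induction l with
  | nil => intro d p; simp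
  | cons x xs ih =>
      intro d p
      simp only [List.foldl_cons, ih, pvCellStepGetD, List.countP_cons]
      split <;> push_cast <;> ring

lemma pvCountsB_getD (l : List String) (p : String) :
    (pvCountsB l).getD p 0 = (pvCountA l p : Int) := by
  unfold pvCountsB pvCountA
  rw [pvCountsGetD]
  simp [PySem.Dict.empty, PySem.Dict.getD, PySem.Dict.get?]

lemma pvJoin1 (a : String) : PySem.Str.join " " [a] = a := by
  simp [PySem.Str.join, PySem.Chars.join_singleton]

lemma pvJoin2 (a b : String) : PySem.Str.join " " [a, b] = a ++ " " ++ b := by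
  simp [PySem.Str.join, PySem.Chars.join_cons_cons, PySem.Chars.join_singleton]
  rw [String.append_assoc]
  congr 1
  have h : (" " ++ b).toList = ' ' :: b.toList := by simp
  rw [← h, String.ofList_toList]

-- A's per-cell inner loop produces exactly B's candidate list, filtered by the condition
lemma pvInnerA (c : String → Prop) [DecidablePred c] (text : String) (s : List String) :
    (if 2 ≤ (PySem.Str.split₀ text).length then
      (PySem.List.pyRange 1 (min 3 ((PySem.Str.split₀ text).length : Int)) 1).foldl
        (fun s k =>
          let pfx := PySem.Str.join " " (PySem.List.slice (PySem.Str.split₀ text) none (some k))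
          if c pfx then PySem.Set.add s pfx else s) s
     else s)
    = (pvCandsB text).foldl (fun s p => if c p then PySem.Set.add s p else s) s := by
  unfold pvCandsB
  match hw : PySem.Str.split₀ text with
  | [] => simp
  | [a] => simp
  | [a, b] =>
      have hr : PySem.List.pyRange 1 (min 3 ((2 : Nat) : Int)) 1 = [1] := by decide
      simp only [List.length_cons, List.length_nil, hr]
      rw [if_pos (by omega)]
      simp only [List.foldl_cons, List.foldl_nil]
      rw [PySem.List.slice_to _ (by norm_num)]
      norm_num [pvJoin1]
  | a :: b :: x :: t =>
      have hlen : ((a :: b :: x :: t).length : Int) = (t.length : Int) + 3 := by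
        simp; omega
      have hmin : min 3 (((a :: b :: x :: t).length : Int)) = 3 := by
        rw [hlen]; omega
      have hr : PySem.List.pyRange 1 3 1 = [1, 2] := by decide
      rw [hmin, hr]
      rw [if_pos (by simp)]
      simp only [List.foldl_cons, List.foldl_nil]
      rw [PySem.List.slice_to _ (by norm_num), PySem.List.slice_to _ (by norm_num)]
      have ht2 : List.take (Int.toNat 2) (a :: b :: x :: t) = [a, b] := rfl
      rw [ht2, pvJoin2]
      norm_num [pvJoin1]

-- folding over a flatMap is the nested fold
lemma pvFoldlFlatMap {α β δ : Type} (f : α → List β) (g : δ → β → δ) :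
    ∀ (l : List α) (i : δ),
    (l.flatMap f).foldl g i = l.foldl (fun i x => (f x).foldl g i) i := by
  intro l
  induction l with
  | nil => intro i; rfl
  | cons x xs ih => intro i; simp [List.foldl_append, ih]

-- ===== VERDICT (by name: the statement is the Claim_ definition above) =====
theorem detect_common_prefixes_spec : Claim_equal_detect_common_prefixes := by
  intro table_data _
  unfold Spec_detect_common_prefixes detect_common_prefixes detect_common_prefixes_alt
  rw [pvFirstCol_eq]
  set fc := pvFirstColA table_data with hfcdef
  by_cases h0 : table_data = []
  · have : fc = [] := by rw [hfcdef, h0]; rfl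
    simp [h0, this]
  · simp only [h0, if_false]
    by_cases h2 : fc.length < 2
    · simp [h2]
    · simp only [h2, if_false]
      -- right side: filter-then-fold = fold-with-if, over flatMap = nested fold
      rw [← PySem.List.foldl_if_eq_foldl_filter, pvFoldlFlatMap]
      apply pvFoldlFunCongr
      intro prefixes text
      rw [pvInnerA (fun p => 2 ≤ pvCountA fc p) text prefixes]
      apply pvFoldlFunCongr
      intro s p
      rw [pvCountsB_getD]
      have hiff : ((2 : Int) ≤ (pvCountA fc p : Int)) ↔ 2 ≤ pvCountA fc p := by
        exact_mod_cast Iff.rfl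
      simp [hiff]
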